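-- pv_equiv track=rewrite | github.com/DannyLee12/dcp | _2020/05_May/99.py | in_set
-- ===== SOURCE A (Python) =====
-- def in_set(i: int, s: set, total: int = 0, visited=None) -> int:
--     """Recursively add items in the set"""
--     if not visited:
--         visited = []
--     if i not in visited:
--         if i in s:
--             visited.append(i)
--             return total + 1 + in_set(i + 1, s, visited=visited) + \
--                                in_set(i - 1, s, visited=visited)
--     return 0
-- ===== SOURCE B (Python) =====
-- def in_set(i: int, s: set, total: int = 0, visited=None) -> int:
--     """Iterative outward scan counting the contiguous run in s containing i."""
--     if not visited:
--         visited = []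
--     if i in visited or i not in s:
--         return 0
--     visited.append(i)
--     count = 1
--     j = i + 1
--     while j in s and j not in visited:
--         visited.append(j)
--         count += 1
--         j += 1
--     j = i - 1
--     while j in s and j not in visited:
--         visited.append(j)
--         count += 1
--         j -= 1
--     return total + count
-- ===== Notes on version B (the rewrite author's own statement) =====
-- stated objective: simpler
-- what changed: Replaced the two-way recursion that threads a shared visited list through nested calls by a flat guard plus two explicit while loops scanning outward (up from i+1, then down from i-1), with no recursion at all.
import Mathlib
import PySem

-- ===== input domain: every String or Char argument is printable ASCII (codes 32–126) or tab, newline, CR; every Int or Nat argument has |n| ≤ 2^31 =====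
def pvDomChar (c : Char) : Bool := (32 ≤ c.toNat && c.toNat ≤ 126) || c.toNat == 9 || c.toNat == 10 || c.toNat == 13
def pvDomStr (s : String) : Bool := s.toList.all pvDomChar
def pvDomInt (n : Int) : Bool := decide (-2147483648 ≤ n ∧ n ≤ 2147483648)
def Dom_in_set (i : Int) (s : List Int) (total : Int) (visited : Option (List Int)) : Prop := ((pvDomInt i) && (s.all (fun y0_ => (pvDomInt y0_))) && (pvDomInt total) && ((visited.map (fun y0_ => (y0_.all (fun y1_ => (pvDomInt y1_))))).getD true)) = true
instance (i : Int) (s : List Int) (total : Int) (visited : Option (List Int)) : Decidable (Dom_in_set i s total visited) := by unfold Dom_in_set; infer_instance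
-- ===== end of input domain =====

-- B replaces A's two-way recursion (with the shared `visited` list threaded through the
-- recursive calls) by a guard plus two explicit iterative outward scans; objective: simpler.
-- A mutates a non-empty `visited` argument in place; B performs the same mutation in the
-- same order, but the equivalence proved here is about the RETURN value only.

-- ===== PORT A =====
-- The Python recursion terminates because each productive call appends a fresh element of s
-- to visited; the fuel s.length + 1 is only a totality guard and is never exhausted.
def inSetAux (s : List Int) : Nat → Int → Int → List Int → Int × List Int
  | 0, _, _, visited => (0, visited)
  | fuel + 1, i, total, visited =>
    if i ∈ visited then (0, visited)
    else if i ∈ s then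
      let v1 := visited ++ [i]
      let r1 := inSetAux s fuel (i + 1) 0 v1
      let r2 := inSetAux s fuel (i - 1) 0 r1.2
      (total + 1 + r1.1 + r2.1, r2.2)
    else (0, visited)

def in_set (i : Int) (s : List Int) (total : Int) (visited : Option (List Int)) : Int :=
  let v0 := match visited with | none => [] | some v => v   -- `if not visited: visited = []`
  (inSetAux s (s.length + 1) i total v0).1

-- ===== PORT B =====
-- B's upward while loop; the fuel s.length is a totality guard only (the loop visits
-- distinct elements of s, so it iterates at most s.length times).
def scanUp (s : List Int) : Nat → Int → List Int → Int × List Int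
  | 0, _, v => (0, v)
  | fuel + 1, j, v =>
    if j ∈ s ∧ j ∉ v then
      let r := scanUp s fuel (j + 1) (v ++ [j])
      (r.1 + 1, r.2)
    else (0, v)

-- B's downward while loop.
def scanDown (s : List Int) : Nat → Int → List Int → Int × List Int
  | 0, _, v => (0, v)
  | fuel + 1, j, v =>
    if j ∈ s ∧ j ∉ v then
      let r := scanDown s fuel (j - 1) (v ++ [j])
      (r.1 + 1, r.2)
    else (0, v)

def in_set_alt (i : Int) (s : List Int) (total : Int) (visited : Option (List Int)) : Int :=
  let v0 := match visited with | none => [] | some v => v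
  if i ∈ v0 ∨ i ∉ s then 0
  else
    let v1 := v0 ++ [i]
    let up := scanUp s s.length (i + 1) v1
    let down := scanDown s s.length (i - 1) up.2
    total + 1 + up.1 + down.1

-- ===== PRECONDITION & SPEC =====
def Spec_in_set (i : Int) (s : List Int) (total : Int) (visited : Option (List Int)) (out : Int) : Prop := out = in_set_alt i s total visited
instance (i : Int) (s : List Int) (total : Int) (visited : Option (List Int)) (out : Int) : Decidable (Spec_in_set i s total visited out) := by unfold Spec_in_set; infer_instance

-- ===== CLAIM (what is proved, stated in full; the proofs are below) =====
def Claim_equal_in_set : Prop := ∀ (i : Int) (s : List Int) (total : Int) (visited : Option (List Int)), Dom_in_set i s total visited → Spec_in_set i s total visited (in_set i s total visited)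

-- ===== LEMMAS AND PROOFS =====

-- A visited node makes the recursion return immediately with visited unchanged.
theorem inSetAux_mem_stop (s : List Int) (fuel : Nat) (i t : Int) (v : List Int)
    (h : i ∈ v) : inSetAux s fuel i t v = (0, v) := by
  cases fuel with
  | zero => rfl
  | succ fuel => simp [inSetAux, h]

theorem scanUp_mem (s : List Int) (fuel : Nat) (j : Int) (v : List Int) (x : Int)
    (h : x ∈ v) : x ∈ (scanUp s fuel j v).2 := by
  induction fuel generalizing j v with
  | zero => simpa [scanUp] using h
  | succ fuel ih =>
    by_cases hc : j ∈ s ∧ j ∉ v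
    · simp only [scanUp, if_pos hc]
      exact ih (j + 1) (v ++ [j]) (List.mem_append_left _ h)
    · simpa [scanUp, if_neg hc] using h

-- With the predecessor already visited, A's recursion from j is exactly B's upward loop.
theorem inSetAux_eq_scanUp (s : List Int) (fuel : Nat) (j : Int) (v : List Int)
    (h : j - 1 ∈ v) : inSetAux s fuel j 0 v = scanUp s fuel j v := by
  induction fuel generalizing j v with
  | zero => rfl
  | succ fuel ih =>
    by_cases hv : j ∈ v
    · simp [inSetAux, scanUp, hv]
    · by_cases hs : j ∈ s
      · have h1 : j + 1 - 1 ∈ v ++ [j] := by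
          simp [show j + 1 - 1 = j by ring]
        have e1 : inSetAux s fuel (j + 1) 0 (v ++ [j]) = scanUp s fuel (j + 1) (v ++ [j]) :=
          ih (j + 1) (v ++ [j]) h1
        have h2 : j - 1 ∈ (scanUp s fuel (j + 1) (v ++ [j])).2 :=
          scanUp_mem s fuel (j + 1) (v ++ [j]) (j - 1) (List.mem_append_left _ h)
        have e2 : inSetAux s fuel (j - 1) 0 (scanUp s fuel (j + 1) (v ++ [j])).2
            = (0, (scanUp s fuel (j + 1) (v ++ [j])).2) :=
          inSetAux_mem_stop s fuel (j - 1) 0 _ h2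
        simp only [inSetAux, scanUp, if_neg hv, if_pos hs, if_pos (And.intro hs hv), e1, e2]
        exact Prod.ext (by ring) rfl
      · simp [inSetAux, scanUp, hv, hs]

-- With the successor already visited, A's recursion from j is exactly B's downward loop.
theorem inSetAux_eq_scanDown (s : List Int) (fuel : Nat) (j : Int) (v : List Int)
    (h : j + 1 ∈ v) : inSetAux s fuel j 0 v = scanDown s fuel j v := by
  induction fuel generalizing j v with
  | zero => rfl
  | succ fuel ih =>
    by_cases hv : j ∈ v
    · simp [inSetAux, scanDown, hv]
    · by_cases hs : j ∈ s
      · have e1 : inSetAux s fuel (j + 1) 0 (v ++ [j]) = (0, v ++ [j]) :=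
          inSetAux_mem_stop s fuel (j + 1) 0 _ (List.mem_append_left _ h)
        have h1 : j - 1 + 1 ∈ v ++ [j] := by
          simp [show j - 1 + 1 = j by ring]
        have e2 : inSetAux s fuel (j - 1) 0 (v ++ [j]) = scanDown s fuel (j - 1) (v ++ [j]) :=
          ih (j - 1) (v ++ [j]) h1
        simp only [inSetAux, scanDown, if_neg hv, if_pos hs, if_pos (And.intro hs hv), e1, e2]
        exact Prod.ext (by ring) rfl
      · simp [inSetAux, scanDown, hv, hs]

-- ===== VERDICT (by name: the statement is the Claim_ definition above) =====
theorem in_set_spec : Claim_equal_in_set := by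
  intro i s total visited _
  unfold Spec_in_set in_set in_set_alt
  set v0 := (match visited with | none => ([] : List Int) | some v => v) with hv0
  by_cases hv : i ∈ v0
  · simp [inSetAux_mem_stop s (s.length + 1) i total v0 hv, hv]
  · by_cases hs : i ∈ s
    · have h1 : i + 1 - 1 ∈ v0 ++ [i] := by simp [show i + 1 - 1 = i by ring]
      have e1 : inSetAux s s.length (i + 1) 0 (v0 ++ [i])
          = scanUp s s.length (i + 1) (v0 ++ [i]) :=
        inSetAux_eq_scanUp s s.length (i + 1) (v0 ++ [i]) h1
      have h2 : i - 1 + 1 ∈ (scanUp s s.length (i + 1) (v0 ++ [i])).2 := by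
        have : i - 1 + 1 = i := by ring
        rw [this]
        exact scanUp_mem s s.length (i + 1) (v0 ++ [i]) i (by simp)
      have e2 : inSetAux s s.length (i - 1) 0 (scanUp s s.length (i + 1) (v0 ++ [i])).2
          = scanDown s s.length (i - 1) (scanUp s s.length (i + 1) (v0 ++ [i])).2 :=
        inSetAux_eq_scanDown s s.length (i - 1) _ h2
      simp [inSetAux, hv, hs, e1, e2]
    · simp only [inSetAux, if_neg hv, if_neg hs]
      simp [hs]
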